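-- pv_equiv track=rewrite | github.com/iiitv/ChefLib | 2017/MAY/MAY17/WSITES01/WSITES01.py | calculate
-- ===== SOURCE A (Python) =====
-- def calculate(check, yes):
--     for i in range(len(check)):
--         temp = check[0:i+1]
--         j = 0
--         for _ in range(len(yes)):
--             if i > len(yes[j]):
--                 j += 1
--                 continue
--             if temp == yes[j][0:i+1]:
--                 break
--             j += 1
--         if j == len(yes):
--             return temp
--     return 'NO'
-- ===== SOURCE B (Python) =====
-- def calculate(check, yes):
--     survivors = yes
--     for k in range(len(check)):
--         c = check[k]
--         survivors = [s for s in survivors if len(s) > k and s[k] == c]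
--         if not survivors:
--             return check[:k+1]
--     return 'NO'
-- ===== Notes on version B (the rewrite author's own statement) =====
-- stated objective: faster
-- what changed: Instead of re-comparing every prefix of check against every yes string from scratch, B keeps a shrinking survivor list of yes strings still matching the current prefix and filters it by one character per step, so each yes string is examined only while it still matches.
import Mathlib
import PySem

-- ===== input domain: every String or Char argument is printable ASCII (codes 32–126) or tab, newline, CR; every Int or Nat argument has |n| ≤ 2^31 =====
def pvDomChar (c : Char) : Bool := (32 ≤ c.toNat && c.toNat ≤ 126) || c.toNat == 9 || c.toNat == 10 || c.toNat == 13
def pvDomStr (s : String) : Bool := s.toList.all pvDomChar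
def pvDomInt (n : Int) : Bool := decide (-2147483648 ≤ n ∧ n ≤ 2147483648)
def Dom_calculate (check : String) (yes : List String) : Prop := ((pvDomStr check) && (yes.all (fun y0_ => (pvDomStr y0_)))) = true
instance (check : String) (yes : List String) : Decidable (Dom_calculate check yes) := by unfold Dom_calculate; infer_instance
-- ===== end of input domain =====

-- B replaces A's rescans of all of `yes` for every prefix length by a single pass that
-- filters a shrinking survivor list one character at a time (objective: faster).

-- ===== PORT A =====
-- inner `for _ in range(len(yes))` loop: iteration number always equals j until break,
-- so scanning the list structurally with counter j is exact; returns final j.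
def calcAInner (i : Int) (temp : List Char) : List String → Int → Int
  | [], j => j
  | y :: rest, j =>
    if i > (y.toList.length : Int) then calcAInner i temp rest (j + 1)
    else if temp = PySem.List.slice y.toList (some 0) (some (i + 1)) then j
    else calcAInner i temp rest (j + 1)

def calcAOuter (check : List Char) (yes : List String) (i : Nat) : String :=
  if i < check.length then
    let temp := PySem.List.slice check (some 0) (some ((i : Int) + 1))
    let j := calcAInner (i : Int) temp yes 0
    if j = (yes.length : Int) then String.ofList temp else calcAOuter check yes (i + 1)
  else "NO"
termination_by check.length - i

def calculate (check : String) (yes : List String) : String :=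
  calcAOuter check.toList yes 0

-- ===== PORT B =====
-- `len(s) > k and s[k] == c` is exactly `s.toList[k]? == some c` for the Nat index k.
def calcBLoop (check : List Char) (survivors : List String) (k : Nat) : String :=
  if h : k < check.length then
    let c := check[k]
    let survivors' := survivors.filter (fun s => s.toList[k]? == some c)
    if survivors' = [] then String.ofList (PySem.List.slice check (some 0) (some ((k : Int) + 1)))
    else calcBLoop check survivors' (k + 1)
  else "NO"
termination_by check.length - k

def calculate_alt (check : String) (yes : List String) : String :=
  calcBLoop check.toList yes 0

-- ===== PRECONDITION & SPEC =====
def Spec_calculate (check : String) (yes : List String) (out : String) : Prop := out = calculate_alt check yes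
instance (check : String) (yes : List String) (out : String) : Decidable (Spec_calculate check yes out) := by unfold Spec_calculate; infer_instance

-- ===== CLAIM (what is proved, stated in full; the proofs are below) =====
def Claim_equal_calculate : Prop := ∀ (check : String) (yes : List String), Dom_calculate check yes → Spec_calculate check yes (calculate check yes)

-- ===== LEMMAS AND PROOFS =====

-- check[0:i+1] for a Nat i is take (i+1)
theorem pvSlice01 (l : List Char) (i : Nat) :
    PySem.List.slice l (some 0) (some ((i : Int) + 1)) = l.take (i + 1) := by
  have h : ((i : Int) + 1) = ((i + 1 : Nat) : Int) := by push_cast; ring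
  simp only [PySem.List.slice_zero_start, h, PySem.List.slice_to_natCast]

-- the inner scan returns len(yes)+j exactly when no yes string has temp as a prefix
theorem pvInner_eq (i : Nat) (temp : List Char) (ht : temp.length = i + 1) :
    ∀ (l : List String) (j : Int),
      (calcAInner (i : Int) temp l j = (l.length : Int) + j ↔ ∀ y ∈ l, ¬ temp <+: y.toList) := by
  intro l
  induction l with
  | nil => intro j; simp [calcAInner]
  | cons y rest ih =>
    intro j
    by_cases h1 : (i : Int) > (y.toList.length : Int)
    · have hnp : ¬ temp <+: y.toList := by
        intro hp
        have := hp.length_le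
        omega
      have harith : ((y :: rest).length : Int) + j = (rest.length : Int) + (j + 1) := by
        push_cast [List.length_cons]; ring
      simp only [calcAInner, if_pos h1, harith, List.mem_cons]
      rw [ih (j + 1)]
      constructor
      · rintro hall z (rfl | hz)
        · exact hnp
        · exact hall z hz
      · intro hall z hz; exact hall z (Or.inr hz)
    · have hsl : PySem.List.slice y.toList (some 0) (some ((i : Int) + 1)) = y.toList.take (i + 1) :=
        pvSlice01 y.toList i
      by_cases h2 : temp = PySem.List.slice y.toList (some 0) (some ((i : Int) + 1))
      · have hp : temp <+: y.toList := by
          rw [h2, hsl]; exact List.take_prefix _ _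
        simp only [calcAInner, if_neg h1, if_pos h2]
        constructor
        · intro hj
          exfalso
          have hz : ((y :: rest).length : Int) = 0 := by omega
          simp at hz; omega
        · intro hall; exact absurd hp (hall y (List.mem_cons_self))
      · have hnp : ¬ temp <+: y.toList := by
          intro hp
          rw [List.prefix_iff_eq_take, ht] at hp
          exact h2 (hp.trans hsl.symm)
        have harith : ((y :: rest).length : Int) + j = (rest.length : Int) + (j + 1) := by
          push_cast [List.length_cons]; ring
        simp only [calcAInner, if_neg h1, if_neg h2, harith, List.mem_cons]
        rw [ih (j + 1)]
        constructor
        · rintro hall z (rfl | hz)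
          · exact hnp
          · exact hall z hz
        · intro hall z hz; exact hall z (Or.inr hz)

-- extending a matched prefix by one character
theorem pvPrefixStep (check : List Char) (k : Nat) (h : k < check.length) (s : List Char) :
    (check.take (k + 1) <+: s) ↔ (check.take k <+: s ∧ s[k]? = some check[k]) := by
  have hlen1 : (check.take (k + 1)).length = k + 1 := by simp; omega
  have hlen0 : (check.take k).length = k := by simp; omega
  rw [List.prefix_iff_eq_take, List.prefix_iff_eq_take, hlen1, hlen0]
  have hsucc_c : check.take (k + 1) = check.take k ++ [check[k]] := by
    rw [List.take_add_one, List.getElem?_eq_getElem h]; rfl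
  constructor
  · intro he
    have htk : check.take k = s.take k := by
      have := congrArg (fun l => List.take k l) he
      simpa [List.take_take] using this
    refine ⟨htk, ?_⟩
    have : s[k]? = (s.take (k + 1))[k]? := by
      rw [List.getElem?_take_of_lt (by omega)]
    rw [this, ← he, List.getElem?_take_of_lt (by omega), List.getElem?_eq_getElem h]
  · rintro ⟨htk, hgk⟩
    have hk_s : k < s.length := (List.getElem?_eq_some_iff.mp hgk).1
    have hsk : s[k] = check[k] := by
      have := List.getElem?_eq_getElem hk_s
      rw [this] at hgk; exact Option.some.inj hgk
    rw [hsucc_c, List.take_add_one, List.getElem?_eq_getElem hk_s, hsk, htk]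
    rfl

-- main loop correspondence: B's survivor list is exactly the yes strings matching the prefix so far
theorem pvLoops_eq (check : List Char) (yes : List String) :
    ∀ (n k : Nat), check.length - k ≤ n →
      calcAOuter check yes k =
        calcBLoop check (yes.filter (fun s => decide (check.take k <+: s.toList))) k := by
  intro n
  induction n with
  | zero =>
    intro k hk
    have h : ¬ k < check.length := by omega
    rw [calcAOuter, calcBLoop]
    simp [h]
  | succ m ih =>
    intro k hk
    by_cases h : k < check.length
    · have ht : (check.take (k + 1)).length = k + 1 := by simp; omega
      have hinner := pvInner_eq (i := k) (temp := check.take (k + 1)) ht yes 0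
      -- the two stopping conditions coincide
      have hfilters :
          (yes.filter (fun s => decide (check.take k <+: s.toList))).filter
              (fun s => s.toList[k]? == some check[k]) =
            yes.filter (fun s => decide (check.take (k + 1) <+: s.toList)) := by
        rw [List.filter_filter]
        apply List.filter_congr
        intro s _
        by_cases hp : List.take k check <+: s.toList <;>
          by_cases hq : s.toList[k]? = some check[k] <;>
            simp [pvPrefixStep check k h s.toList, hp, hq]
      have hcond :
          (calcAInner (k : Int) (check.take (k + 1)) yes 0 = (yes.length : Int)) ↔
            (yes.filter (fun s => decide (check.take (k + 1) <+: s.toList)) = []) := by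
        rw [List.filter_eq_nil_iff]
        constructor
        · intro hj
          have := hinner.mp (by omega)
          intro s hs
          simpa using this s hs
        · intro hall
          have : ∀ y ∈ yes, ¬ check.take (k + 1) <+: y.toList := by
            intro y hy; simpa using hall y hy
          have := hinner.mpr this
          omega
      rw [calcAOuter, calcBLoop]
      simp only [if_pos h, dif_pos h, hfilters, pvSlice01]
      by_cases hstop : yes.filter (fun s => decide (check.take (k + 1) <+: s.toList)) = []
      · rw [if_pos (hcond.mpr hstop), if_pos hstop]
      · rw [if_neg (fun hj => hstop (hcond.mp hj)), if_neg hstop]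
        exact ih (k + 1) (by omega)
    · rw [calcAOuter, calcBLoop]
      simp [h]

-- ===== VERDICT (by name: the statement is the Claim_ definition above) =====
theorem calculate_spec : Claim_equal_calculate := by
  intro check yes _
  unfold Spec_calculate calculate calculate_alt
  have h := pvLoops_eq check.toList yes check.toList.length 0 (by omega)
  simpa using h
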